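-- pv_equiv track=rewrite | github.com/evhub/coconut | coconut/parser.py | pipe_proc
-- ===== SOURCE A (Python) =====
-- class CoconutException(Exception):
--     """Base Coconut exception."""
--     def __init__(self, value, item=None):
--         """creates the Coconut exception."""
--         self.value = value
--         if item is not None:
--             self.value += ": " + ascii(item)
--     def __repr__(self):
--         """Displays the Coconut exception."""
--         return self.value
--     def __str__(self):
--         """Wraps repr."""
--         return repr(self)
--
-- def pipe_proc(tokens):
--     """Processes pipe calls."""
--     if len(tokens) == 1:
--         return tokens[0]
--     else:
--         func = tokens.pop()
--         op = tokens.pop()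
--         if op == "|>":
--             return "("+func+")("+pipe_proc(tokens)+")"
--         elif op == "|*>":
--             return "("+func+")(*"+pipe_proc(tokens)+")"
--         elif op == "<|":
--             return "("+pipe_proc(tokens)+")("+func+")"
--         elif op == "<*|":
--             return "("+pipe_proc(tokens)+")(*"+func+")"
--         else:
--             raise CoconutException("invalid pipe operator: "+op)
-- ===== SOURCE B (Python) =====
-- class CoconutException(Exception):
--     """Base Coconut exception."""
--     def __init__(self, value, item=None):
--         self.value = value
--         if item is not None:
--             self.value += ": " + ascii(item)
--     def __repr__(self):
--         return self.value
--     def __str__(self):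
--         return repr(self)
--
-- def pipe_proc(tokens):
--     """Processes pipe calls iteratively: fold the op/func pairs left-to-right
--     around the base token (innermost first). Does not mutate tokens."""
--     out = tokens[0]
--     rest = tokens[1:]
--     while rest:
--         op, func = rest[0], rest[1]
--         if op == "|>":
--             out = "(" + func + ")(" + out + ")"
--         elif op == "|*>":
--             out = "(" + func + ")(*" + out + ")"
--         elif op == "<|":
--             out = "(" + out + ")(" + func + ")"
--         elif op == "<*|":
--             out = "(" + out + ")(*" + func + ")"
--         else:
--             raise CoconutException("invalid pipe operator: " + op)
--         rest = rest[2:]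
--     return out
-- ===== Notes on version B (the rewrite author's own statement) =====
-- stated objective: alternative
-- what changed: Replaces A's right-popping recursion (which mutates tokens) with a non-mutating single left-to-right loop that folds the (op, func) pairs around the base token innermost-first; equivalence is about the return value only since A pops tokens in place.
import Mathlib
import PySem

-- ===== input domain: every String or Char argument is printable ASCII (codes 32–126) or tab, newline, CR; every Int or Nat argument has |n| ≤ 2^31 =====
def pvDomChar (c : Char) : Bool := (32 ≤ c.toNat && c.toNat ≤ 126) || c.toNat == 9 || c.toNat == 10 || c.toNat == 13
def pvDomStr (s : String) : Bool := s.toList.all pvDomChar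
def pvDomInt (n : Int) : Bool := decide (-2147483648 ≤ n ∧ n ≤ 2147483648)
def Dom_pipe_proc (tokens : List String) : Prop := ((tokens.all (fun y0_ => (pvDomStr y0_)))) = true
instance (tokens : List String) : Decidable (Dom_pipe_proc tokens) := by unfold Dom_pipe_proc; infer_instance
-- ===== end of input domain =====

-- B replaces A's right-popping recursion with a non-mutating left-to-right loop over the
-- op/func pairs (innermost first); equivalence is about the return value only (A pops
-- from `tokens` in place).

-- ===== PORT A =====
-- Literal port of A's recursion: pop func, pop op, wrap around the recursive result.
-- The "" branches stand for Python exceptions (IndexError on pop of [], CoconutException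
-- on an invalid operator); exactly those inputs are excluded by Pre_pipe_proc.
def pipe_proc (tokens : List String) : String :=
  if tokens.length = 1 then tokens.headD ""
  else if tokens.length = 0 then ""  -- tokens.pop() on []: IndexError
  else
    let func := tokens.getLast?.getD ""
    let t1 := tokens.dropLast
    if t1.length = 0 then ""  -- second pop on []: IndexError
    else
      let op := t1.getLast?.getD ""
      let t2 := t1.dropLast
      if op = "|>" then "(" ++ func ++ ")(" ++ pipe_proc t2 ++ ")"
      else if op = "|*>" then "(" ++ func ++ ")(*" ++ pipe_proc t2 ++ ")"
      else if op = "<|" then "(" ++ pipe_proc t2 ++ ")(" ++ func ++ ")"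
      else if op = "<*|" then "(" ++ pipe_proc t2 ++ ")(*" ++ func ++ ")"
      else ""  -- raise CoconutException
termination_by tokens.length
decreasing_by
  all_goals simp only [List.length_dropLast]; omega

-- ===== PORT B =====
-- the while-loop of Source B: state `out`, list `rest` consumed two at a time from the left
def pipeLoop (out : String) (rest : List String) : String :=
  match rest with
  | [] => out
  | [_] => ""  -- rest[1]: IndexError (excluded by Pre_pipe_proc)
  | op :: func :: rest' =>
    if op = "|>" then pipeLoop ("(" ++ func ++ ")(" ++ out ++ ")") rest'
    else if op = "|*>" then pipeLoop ("(" ++ func ++ ")(*" ++ out ++ ")") rest'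
    else if op = "<|" then pipeLoop ("(" ++ out ++ ")(" ++ func ++ ")") rest'
    else if op = "<*|" then pipeLoop ("(" ++ out ++ ")(*" ++ func ++ ")") rest'
    else ""  -- raise CoconutException

def pipe_proc_alt (tokens : List String) : String :=
  match tokens with
  | [] => ""  -- tokens[0]: IndexError (excluded by Pre_pipe_proc)
  | h :: t => pipeLoop h t

-- ===== PRECONDITION & SPEC =====
def validOp (op : String) : Bool :=
  op = "|>" || op = "|*>" || op = "<|" || op = "<*|"

-- shape of the tail: a sequence of (valid operator, function) pairs
def chainOk : List String → Bool
  | [] => true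
  | [_] => false
  | op :: _ :: rest => validOp op && chainOk rest

-- Pre_ excludes exactly the inputs where A raises: an empty list / an even-length list
-- (IndexError from pop) or an invalid operator at an odd position (CoconutException).
def Pre_pipe_proc (tokens : List String) : Prop :=
  tokens ≠ [] ∧ chainOk tokens.tail = true
instance (tokens : List String) : Decidable (Pre_pipe_proc tokens) := by
  unfold Pre_pipe_proc; infer_instance

def pvWitness_pipe_proc : List String := ["x", "|>", "f"]

def Spec_pipe_proc (tokens : List String) (out : String) : Prop := out = pipe_proc_alt tokens
instance (tokens : List String) (out : String) : Decidable (Spec_pipe_proc tokens out) := by unfold Spec_pipe_proc; infer_instance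

-- ===== CLAIM (what is proved, stated in full; the proofs are below) =====
def Claim_equal_pipe_proc : Prop := ∀ (tokens : List String), Dom_pipe_proc tokens → Pre_pipe_proc tokens → Spec_pipe_proc tokens (pipe_proc tokens)

-- ===== LEMMAS AND PROOFS =====

-- proof-side view of a chain: a list of (op, func) pairs
def toks : List (String × String) → List String
  | [] => []
  | (op, f) :: ps => op :: f :: toks ps

def wrapA (op f s : String) : String :=
  if op = "|>" then "(" ++ f ++ ")(" ++ s ++ ")"
  else if op = "|*>" then "(" ++ f ++ ")(*" ++ s ++ ")"
  else if op = "<|" then "(" ++ s ++ ")(" ++ f ++ ")"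
  else if op = "<*|" then "(" ++ s ++ ")(*" ++ f ++ ")"
  else ""

def stepP (s : String) (p : String × String) : String := wrapA p.1 p.2 s

theorem toks_append (ps qs : List (String × String)) :
    toks (ps ++ qs) = toks ps ++ toks qs := by
  induction ps with
  | nil => rfl
  | cons p ps ih => cases p; simp [toks, ih]

theorem chainOk_toks (rest : List String) (h : chainOk rest = true) :
    ∃ ps : List (String × String),
      rest = toks ps ∧ ∀ p ∈ ps, validOp p.1 = true := by
  fun_induction chainOk rest with
  | case1 => exact ⟨[], rfl, by simp⟩
  | case2 x => simp at h
  | case3 op f rest' ih =>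
    simp only [Bool.and_eq_true] at h
    obtain ⟨ps, hps, hv⟩ := ih h.2
    exact ⟨(op, f) :: ps, by simp [toks, hps], by
      intro p hp
      rcases List.mem_cons.mp hp with h' | h'
      · subst h'; exact h.1
      · exact hv p h'⟩

theorem pipe_proc_concat (ts : List String) (op f : String) (hv : validOp op = true) :
    pipe_proc (ts ++ [op, f]) = wrapA op f (pipe_proc ts) := by
  have hsplit : ts ++ [op, f] = (ts ++ [op]) ++ [f] := by simp
  have h1 : (ts ++ [op, f]).getLast?.getD "" = f := by rw [hsplit, List.getLast?_concat]; rfl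
  have h2 : (ts ++ [op, f]).dropLast = ts ++ [op] := by rw [hsplit, List.dropLast_concat]
  have h3 : (ts ++ [op]).getLast?.getD "" = op := by rw [List.getLast?_concat]; rfl
  have h4 : (ts ++ [op]).dropLast = ts := by rw [List.dropLast_concat]
  have hlen : (ts ++ [op, f]).length = ts.length + 2 := by simp
  rw [pipe_proc]
  simp only [hlen, h1, h2, h3, h4]
  have hne1 : ¬ (ts.length + 2 = 1) := by omega
  have hne0 : ¬ (ts.length + 2 = 0) := by omega
  have hne0' : ¬ ((ts ++ [op]).length = 0) := by simp
  simp only [hne1, hne0, hne0', if_false]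
  unfold validOp at hv
  simp only [Bool.or_eq_true, decide_eq_true_eq] at hv
  unfold wrapA
  rcases hv with ((h | h) | h) | h <;> simp [h]

theorem pipe_proc_foldl (ps : List (String × String)) (h0 : String)
    (hv : ∀ p ∈ ps, validOp p.1 = true) :
    pipe_proc (h0 :: toks ps) = ps.foldl stepP h0 := by
  induction ps using List.reverseRecOn with
  | nil => simp [toks]; rw [pipe_proc]; simp
  | append_singleton ps p ih =>
    cases p with
    | mk op f =>
      have hvop : validOp op = true := hv (op, f) (by simp)
      have hv' : ∀ p ∈ ps, validOp p.1 = true := fun p hp => hv p (by simp [hp])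
      rw [toks_append]
      rw [show h0 :: (toks ps ++ toks [(op, f)]) = (h0 :: toks ps) ++ [op, f] by
        simp [toks]]
      rw [pipe_proc_concat _ _ _ hvop, ih hv', List.foldl_concat]
      rfl

theorem pipeLoop_foldl (ps : List (String × String)) (out : String)
    (hv : ∀ p ∈ ps, validOp p.1 = true) :
    pipeLoop out (toks ps) = ps.foldl stepP out := by
  induction ps generalizing out with
  | nil => simp [toks, pipeLoop]
  | cons p ps ih =>
    cases p with
    | mk op f =>
      have hvop : validOp op = true := hv (op, f) (by simp)
      have hv' : ∀ p ∈ ps, validOp p.1 = true := fun p hp => hv p (by simp [hp])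
      unfold validOp at hvop
      simp only [Bool.or_eq_true, decide_eq_true_eq] at hvop
      rcases hvop with ((h | h) | h) | h <;>
        · subst h
          simp [toks, pipeLoop, List.foldl_cons]
          rw [ih _ hv']
          simp [stepP, wrapA]

-- ===== VERDICT (by name: the statement is the Claim_ definition above) =====
theorem pipe_proc_spec : Claim_equal_pipe_proc := by
  intro tokens _ hpre
  obtain ⟨hne, hchain⟩ := hpre
  unfold Spec_pipe_proc
  cases tokens with
  | nil => exact absurd rfl hne
  | cons h0 t =>
    obtain ⟨ps, hps, hv⟩ := chainOk_toks t (by simpa using hchain)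
    subst hps
    show pipe_proc (h0 :: toks ps) = pipe_proc_alt (h0 :: toks ps)
    rw [pipe_proc_foldl ps h0 hv]
    show _ = pipeLoop h0 (toks ps)
    rw [pipeLoop_foldl ps h0 hv]
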